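-- pv_equiv track=rewrite | github.com/luca-soncin-1985/My-Learning-process | Exercises/Python/CodeWars/6kyu/Up and Down Sorting For Each Column.py | up_down_col_sort
-- ===== SOURCE A (Python) =====
-- def up_down_col_sort(matrix):
--     a = sorted(j for x in matrix for j in x)  # sorting the matrix and store it in a var
--
--     r = len(matrix)  # rows number, to be used as a var
--     c = len(matrix[0])  # columns number, to be used as a var
--
--     t = [[0] * c for i in range(r)]  # creates and empty array with the same "matrix" dimensions
--
--     x = 0  # counter
--     z = 0  # controller
--     rev = True  # switch
--     co = 0  # delimiter
--     for i in range(0, c + 1):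
--         co += 1
--         if co == c + 1:
--             break  # when delimiter reaches the total column value, break
--         else:
--             for j in range(0, r):
--                 if rev == True:  # if the switch is True, adds values
--                     t[j][i] = a[x]
--                     x += 1
--                     z += 1
--                     if z % r == 0:  # if we reached the end of the rows, change the switch
--                         rev = False
--
--                 elif rev == False:
--                     w = r - 1 - j
--                     t[w][i] = a[x]
--                     x += 1
--                     z += 1
--                     if z % r == 0:
--                         rev = True
--
--     return t
-- ===== SOURCE B (Python) =====
-- def up_down_col_sort(matrix):
--     a = sorted(j for x in matrix for j in x)
--     r = len(matrix)
--     c = len(matrix[0])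
--     cols = []
--     for i in range(c):
--         chunk = a[i*r:(i+1)*r]
--         cols.append(chunk[::-1] if i % 2 else chunk)
--     return [[cols[i][j] for i in range(c)] for j in range(r)]
-- ===== Notes on version B (the rewrite author's own statement) =====
-- stated objective: simpler
-- what changed: Replaces A's mutable counter/flip-switch zigzag fill (x, z, rev, co state with nested index loops and a break) by slicing the sorted flat list into per-column chunks, reversing every other chunk, and transposing them into rows.
import Mathlib
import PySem

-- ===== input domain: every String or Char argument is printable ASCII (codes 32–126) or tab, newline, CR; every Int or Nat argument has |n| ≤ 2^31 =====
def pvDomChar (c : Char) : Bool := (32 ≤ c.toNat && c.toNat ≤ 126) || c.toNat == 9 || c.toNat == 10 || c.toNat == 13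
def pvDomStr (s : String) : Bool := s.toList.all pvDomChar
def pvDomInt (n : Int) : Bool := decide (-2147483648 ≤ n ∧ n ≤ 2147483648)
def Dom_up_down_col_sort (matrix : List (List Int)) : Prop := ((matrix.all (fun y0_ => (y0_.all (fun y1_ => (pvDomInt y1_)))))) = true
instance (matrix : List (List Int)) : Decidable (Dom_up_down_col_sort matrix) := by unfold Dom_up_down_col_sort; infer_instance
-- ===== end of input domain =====

-- B replaces A's scalar counter/flip-switch fill with slicing the sorted list into column
-- chunks, reversing the odd ones, and transposing (simpler decomposition, same cost).

-- ===== PORT A =====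
-- inner 'for j in range(0, r)' loop of A; state (t, x, z, rev); x, z only ever grow from 0, so Nat
def pvAInner (a : List Int) (r i : Nat) :
    List Nat → (List (List Int) × Nat × Nat × Bool) → (List (List Int) × Nat × Nat × Bool)
  | [], s => s
  | j :: js, (t, x, z, rev) =>
    if rev then
      -- t[j][i] = a[x]; x += 1; z += 1; if z % r == 0: rev = False
      let t' := t.set j ((t.getD j []).set i (a.getD x 0))
      let z' := z + 1
      pvAInner a r i js (t', x + 1, z', if z' % r = 0 then false else rev)
    else
      -- w = r - 1 - j; t[w][i] = a[x]; x += 1; z += 1; if z % r == 0: rev = True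
      let w := r - 1 - j
      let t' := t.set w ((t.getD w []).set i (a.getD x 0))
      let z' := z + 1
      pvAInner a r i js (t', x + 1, z', if z' % r = 0 then true else rev)

-- outer 'for i in range(0, c + 1)' loop with the co counter and the break
def pvAOuter (a : List Int) (r c : Nat) :
    List Nat → Nat → (List (List Int) × Nat × Nat × Bool) → (List (List Int) × Nat × Nat × Bool)
  | [], _, s => s
  | i :: is, co, s =>
    let co' := co + 1
    if co' = c + 1 then s
    else pvAOuter a r c is co' (pvAInner a r i (List.range r) s)

def up_down_col_sort (matrix : List (List Int)) : List (List Int) :=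
  let a := PySem.List.sorted (matrix.flatMap (fun x => x)) (fun j => j) false
  let r := matrix.length
  let c := (PySem.List.pyGetD matrix 0 []).length     -- len(matrix[0]); IndexError on [] excluded by Pre_
  let t := (List.range r).map (fun _ => List.replicate c (0 : Int))
  (pvAOuter a r c (List.range (c + 1)) 0 (t, 0, 0, true)).1

-- ===== PORT B =====
def up_down_col_sort_alt (matrix : List (List Int)) : List (List Int) :=
  let a := PySem.List.sorted (matrix.flatMap (fun x => x)) (fun j => j) false
  let r := matrix.length
  let c := (PySem.List.pyGetD matrix 0 []).length
  let cols := (List.range c).foldl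
    (fun cols i =>
      let chunk := PySem.List.slice a (some ((i * r : Nat) : Int)) (some (((i + 1) * r : Nat) : Int))
      cols ++ [if i % 2 = 0 then chunk else chunk.reverse]) []
  (List.range r).map (fun j => (List.range c).map (fun i => (cols.getD i []).getD j 0))

-- ===== PRECONDITION & SPEC =====
-- Pre_ excludes exactly the inputs where A raises: the empty matrix (matrix[0] → IndexError) and
-- matrices with fewer than len(matrix)*len(matrix[0]) elements in total (a[x] → IndexError).
def Pre_up_down_col_sort (matrix : List (List Int)) : Prop :=
  matrix ≠ [] ∧ matrix.length * (matrix.headD []).length ≤ (matrix.map List.length).sum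
instance (matrix : List (List Int)) : Decidable (Pre_up_down_col_sort matrix) := by
  unfold Pre_up_down_col_sort; infer_instance

def pvWitness_up_down_col_sort : List (List Int) := [[3, 1], [2, 4]]

def Spec_up_down_col_sort (matrix : List (List Int)) (out : List (List Int)) : Prop := out = up_down_col_sort_alt matrix
instance (matrix : List (List Int)) (out : List (List Int)) : Decidable (Spec_up_down_col_sort matrix out) := by unfold Spec_up_down_col_sort; infer_instance

-- ===== CLAIM (what is proved, stated in full; the proofs are below) =====
def Claim_equal_up_down_col_sort : Prop := ∀ (matrix : List (List Int)), Dom_up_down_col_sort matrix → Pre_up_down_col_sort matrix → Spec_up_down_col_sort matrix (up_down_col_sort matrix)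

-- ===== LEMMAS AND PROOFS =====

-- the value the zigzag fill puts in row j of column i
def pvColVal (a : List Int) (r i j : Nat) : Int :=
  if i % 2 = 0 then a.getD (i * r + j) 0 else a.getD (i * r + (r - 1 - j)) 0

-- the matrix with columns < m filled with pvColVal and the rest still 0
def pvBuild (a : List Int) (r c m : Nat) : List (List Int) :=
  (List.range r).map (fun j => (List.range c).map (fun i => if i < m then pvColVal a r i j else 0))

-- one fold step of either inner branch: write f j into row (g j)
def pvFill (g : Nat → Nat) (f : Nat → List Int → List Int)
    (js : List Nat) (t : List (List Int)) : List (List Int) :=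
  js.foldl (fun t j => t.set (g j) (f j (t.getD (g j) []))) t

theorem pvFill_length (g : Nat → Nat) (f : Nat → List Int → List Int)
    (js : List Nat) (t : List (List Int)) : (pvFill g f js t).length = t.length := by
  induction js generalizing t with
  | nil => rfl
  | cons h js ih => simp [pvFill, List.foldl_cons] at ih ⊢; rw [ih, List.length_set]

theorem pvFill_getD_not_mem (g : Nat → Nat) (f : Nat → List Int → List Int)
    (js : List Nat) (t : List (List Int)) (m : Nat) (hm : ∀ j ∈ js, g j ≠ m) :
    (pvFill g f js t).getD m [] = t.getD m [] := by
  induction js generalizing t with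
  | nil => rfl
  | cons h js ih =>
    simp only [pvFill, List.foldl_cons] at ih ⊢
    rw [ih _ (fun j hj => hm j (List.mem_cons_of_mem _ hj))]
    simp only [List.getD]
    rw [List.getElem?_set_ne (hm h List.mem_cons_self)]

theorem pvFill_getD_mem (g : Nat → Nat) (f : Nat → List Int → List Int)
    (js : List Nat) (t : List (List Int)) (j : Nat)
    (hnd : js.Nodup) (hinj : ∀ a ∈ js, ∀ b ∈ js, g a = g b → a = b)
    (hj : j ∈ js) (hlt : g j < t.length) :
    (pvFill g f js t).getD (g j) [] = f j (t.getD (g j) []) := by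
  induction js generalizing t with
  | nil => cases hj
  | cons h js ih =>
    simp only [pvFill, List.foldl_cons] at ih ⊢
    rcases List.mem_cons.1 hj with rfl | hjs
    · have hnm : ∀ j' ∈ js, g j' ≠ g j := by
        intro j' hj' he
        have heq := hinj j' (List.mem_cons_of_mem _ hj') j List.mem_cons_self he
        subst heq
        exact (List.nodup_cons.1 hnd).1 hj'
      have := pvFill_getD_not_mem g f js (t.set (g j) (f j (t.getD (g j) []))) (g j) hnm
      simp only [pvFill] at this
      rw [this]
      simp [List.getD, hlt]
    · have hne : g j ≠ g h := by
        intro he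
        have heq := hinj j (List.mem_cons_of_mem _ hjs) h List.mem_cons_self he
        subst heq
        exact (List.nodup_cons.1 hnd).1 hjs
      rw [ih _ (List.nodup_cons.1 hnd).2
          (fun a ha b hb => hinj a (List.mem_cons_of_mem _ ha) b (List.mem_cons_of_mem _ hb))
          hjs (by rw [List.length_set]; exact hlt)]
      congr 1
      simp only [List.getD]
      rw [List.getElem?_set_ne (Ne.symm hne)]

-- the inner loop, ascending branch (rev = True throughout, flips at the end)
theorem pvAInner_even (a : List Int) (r i : Nat) :
    ∀ n k (t : List (List Int)), k + n = r →
    pvAInner a r i (List.range' k n) (t, i * r + k, i * r + k, if n = 0 then false else true)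
    = (pvFill (fun j => j) (fun j row => row.set i (a.getD (i * r + j) 0)) (List.range' k n) t,
       i * r + r, i * r + r, false) := by
  intro n
  induction n with
  | zero =>
    intro k t hk
    have hkr : k = r := by omega
    subst hkr
    simp [List.range', pvAInner, pvFill]
  | succ n ih =>
    intro k t hk
    rw [List.range'_succ]
    simp only [pvAInner, Nat.succ_ne_zero, reduceIte]
    have hmod : (i * r + k + 1) % r = (k + 1) % r := by
      have h1 : i * r + k + 1 = (k + 1) + i * r := by ring
      rw [h1, Nat.add_mul_mod_self_right]
    have hrev : (if (i * r + k + 1) % r = 0 then false else true)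
        = (if n = 0 then false else true) := by
      rw [hmod]
      rcases Nat.eq_zero_or_pos n with h0 | h0
      · have : k + 1 = r := by omega
        simp [this, Nat.mod_self, h0]
      · have h2 : k + 1 < r := by omega
        rw [Nat.mod_eq_of_lt h2]
        have hn : n ≠ 0 := by omega
        simp [hn]
    rw [hrev]
    have hx : i * r + k + 1 = i * r + (k + 1) := by ring
    rw [hx]
    rw [ih (k + 1) _ (by omega)]
    simp [pvFill]

-- the inner loop, descending branch (rev = False throughout, flips at the end)
theorem pvAInner_odd (a : List Int) (r i : Nat) :
    ∀ n k (t : List (List Int)), k + n = r →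
    pvAInner a r i (List.range' k n) (t, i * r + k, i * r + k, if n = 0 then true else false)
    = (pvFill (fun j => r - 1 - j) (fun j row => row.set i (a.getD (i * r + j) 0)) (List.range' k n) t,
       i * r + r, i * r + r, true) := by
  intro n
  induction n with
  | zero =>
    intro k t hk
    have hkr : k = r := by omega
    subst hkr
    simp [List.range', pvAInner, pvFill]
  | succ n ih =>
    intro k t hk
    rw [List.range'_succ]
    simp only [pvAInner, Nat.succ_ne_zero, reduceIte]
    have hmod : (i * r + k + 1) % r = (k + 1) % r := by
      have h1 : i * r + k + 1 = (k + 1) + i * r := by ring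
      rw [h1, Nat.add_mul_mod_self_right]
    have hrev : (if (i * r + k + 1) % r = 0 then true else false)
        = (if n = 0 then true else false) := by
      rw [hmod]
      rcases Nat.eq_zero_or_pos n with h0 | h0
      · have : k + 1 = r := by omega
        simp [this, Nat.mod_self, h0]
      · have h2 : k + 1 < r := by omega
        rw [Nat.mod_eq_of_lt h2]
        have hn : n ≠ 0 := by omega
        simp [hn]
    rw [hrev]
    have hx : i * r + k + 1 = i * r + (k + 1) := by ring
    rw [hx]
    rw [ih (k + 1) _ (by omega)]
    simp [pvFill]

theorem pvBuild_length (a : List Int) (r c m : Nat) : (pvBuild a r c m).length = r := by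
  simp [pvBuild]

theorem pvBuild_getD (a : List Int) (r c m j : Nat) (hj : j < r) :
    (pvBuild a r c m).getD j [] = (List.range c).map (fun i => if i < m then pvColVal a r i j else 0) := by
  simp [pvBuild, List.getD, hj]

-- writing pvColVal a r m j into slot m of row j advances the partial build by one column
theorem pvRow_set (a : List Int) (r c m j : Nat) (v : Int)
    (hv : v = pvColVal a r m j) :
    ((List.range c).map (fun i => if i < m then pvColVal a r i j else 0)).set m v
    = (List.range c).map (fun i => if i < m + 1 then pvColVal a r i j else 0) := by
  apply List.ext_getElem
  · simp
  intro i h1 h2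
  have hi : i < c := by simpa using h2
  rw [List.getElem_set, List.getElem_map, List.getElem_map]
  simp only [List.getElem_range]
  rcases Nat.decEq m i with he | he
  · rw [if_neg he]
    have : ¬ m = i := he
    split_ifs with hlt hlt' <;> first | rfl | omega
  · subst he
    rw [if_pos rfl, if_pos (by omega), hv]

theorem pvFill_even_build (a : List Int) (r c m : Nat) (hpar : m % 2 = 0) :
    pvFill (fun j => j) (fun j row => row.set m (a.getD (m * r + j) 0)) (List.range' 0 r)
      (pvBuild a r c m) = pvBuild a r c (m + 1) := by
  apply List.ext_getElem
  · rw [pvFill_length, pvBuild_length, pvBuild_length]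
  intro j h1 h2
  have hj : j < r := by rw [pvFill_length, pvBuild_length] at h1; exact h1
  have hmem : j ∈ List.range' 0 r := List.mem_range'_1.2 ⟨Nat.zero_le _, by simpa using hj⟩
  have hmain := pvFill_getD_mem (fun j => j) (fun j row => row.set m (a.getD (m * r + j) 0))
    (List.range' 0 r) (pvBuild a r c m) j List.nodup_range' (fun _ _ _ _ h => h) hmem
    (by rw [pvBuild_length]; exact hj)
  rw [← List.getD_eq_getElem _ [] h1, ← List.getD_eq_getElem _ [] h2, hmain,
    pvBuild_getD a r c m j hj, pvBuild_getD a r c (m + 1) j hj]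
  exact pvRow_set a r c m j _ (by simp [pvColVal, hpar])

theorem pvFill_odd_build (a : List Int) (r c m : Nat) (hpar : m % 2 = 1) :
    pvFill (fun j => r - 1 - j) (fun j row => row.set m (a.getD (m * r + j) 0)) (List.range' 0 r)
      (pvBuild a r c m) = pvBuild a r c (m + 1) := by
  apply List.ext_getElem
  · rw [pvFill_length, pvBuild_length, pvBuild_length]
  intro j h1 h2
  have hj : j < r := by rw [pvFill_length, pvBuild_length] at h1; exact h1
  have hmem : (r - 1 - j) ∈ List.range' 0 r := List.mem_range'_1.2 ⟨Nat.zero_le _, by omega⟩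
  have hinj : ∀ x ∈ List.range' 0 r, ∀ y ∈ List.range' 0 r, r - 1 - x = r - 1 - y → x = y := by
    intro x hx y hy hxy
    have hx' := List.mem_range'_1.1 hx
    have hy' := List.mem_range'_1.1 hy
    omega
  have hmain := pvFill_getD_mem (fun j => r - 1 - j)
    (fun j row => row.set m (a.getD (m * r + j) 0))
    (List.range' 0 r) (pvBuild a r c m) (r - 1 - j) List.nodup_range' hinj hmem
    (by show r - 1 - (r - 1 - j) < (pvBuild a r c m).length; rw [pvBuild_length]; omega)
  simp only at hmain
  rw [show r - 1 - (r - 1 - j) = j from by omega] at hmain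
  rw [← List.getD_eq_getElem _ [] h1, ← List.getD_eq_getElem _ [] h2, hmain,
    pvBuild_getD a r c m j hj, pvBuild_getD a r c (m + 1) j hj]
  exact pvRow_set a r c m j _ (by simp [pvColVal, hpar])

-- the outer loop walks the columns left to right, rev holding the column parity
theorem pvAOuter_spec (a : List Int) (r c : Nat) (hr : 0 < r) :
    ∀ n i0, i0 + n = c + 1 → i0 ≤ c →
    pvAOuter a r c (List.range' i0 n) i0
      (pvBuild a r c i0, i0 * r, i0 * r, if i0 % 2 = 0 then true else false)
    = (pvBuild a r c c, c * r, c * r, if c % 2 = 0 then true else false) := by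
  intro n
  induction n with
  | zero => intro i0 hn hle; omega
  | succ n ih =>
    intro i0 hn hle
    rw [List.range'_succ]
    simp only [pvAOuter]
    by_cases hbreak : i0 + 1 = c + 1
    · have : i0 = c := by omega
      subst this
      simp
    · have hlt : i0 < c := by omega
      rw [if_neg hbreak, List.range_eq_range']
      rcases Nat.even_or_odd i0 with he | ho
      · have hpar : i0 % 2 = 0 := Nat.even_iff.1 he
        rw [if_pos hpar]
        have hcall := pvAInner_even a r i0 r 0 (pvBuild a r c i0) (by omega)
        rw [show (if r = 0 then false else true) = true from by simp [Nat.pos_iff_ne_zero.1 hr],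
            show i0 * r + 0 = i0 * r from by ring] at hcall
        rw [hcall, pvFill_even_build a r c i0 hpar]
        have hstep := ih (i0 + 1) (by omega) (by omega)
        rw [show (if (i0 + 1) % 2 = 0 then true else false) = false from by
              have : (i0 + 1) % 2 = 1 := by omega
              simp [this],
            show (i0 + 1) * r = i0 * r + r from by ring] at hstep
        exact hstep
      · have hpar : i0 % 2 = 1 := Nat.odd_iff.1 ho
        rw [if_neg (by omega)]
        have hcall := pvAInner_odd a r i0 r 0 (pvBuild a r c i0) (by omega)
        rw [show (if r = 0 then true else false) = false from by simp [Nat.pos_iff_ne_zero.1 hr],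
            show i0 * r + 0 = i0 * r from by ring] at hcall
        rw [hcall, pvFill_odd_build a r c i0 hpar]
        have hstep := ih (i0 + 1) (by omega) (by omega)
        rw [show (if (i0 + 1) % 2 = 0 then true else false) = true from by
              have : (i0 + 1) % 2 = 0 := by omega
              simp [this],
            show (i0 + 1) * r = i0 * r + r from by ring] at hstep
        exact hstep

theorem up_down_col_sort_eq_build (matrix : List (List Int)) (h : matrix ≠ []) :
    up_down_col_sort matrix
    = pvBuild (PySem.List.sorted (matrix.flatMap (fun x => x)) (fun j => j) false)
        matrix.length ((PySem.List.pyGetD matrix 0 []).length)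
        ((PySem.List.pyGetD matrix 0 []).length) := by
  have hr : 0 < matrix.length := List.length_pos_of_ne_nil h
  simp only [up_down_col_sort]
  rw [List.range_eq_range']
  have ht0 : (List.range matrix.length).map (fun _ => List.replicate ((PySem.List.pyGetD matrix 0 []).length) (0 : Int))
      = pvBuild (PySem.List.sorted (matrix.flatMap (fun x => x)) (fun j => j) false)
          matrix.length ((PySem.List.pyGetD matrix 0 []).length) 0 := by
    unfold pvBuild
    apply List.map_congr_left
    intro j _
    simp
  rw [ht0]
  have hspec := pvAOuter_spec (PySem.List.sorted (matrix.flatMap (fun x => x)) (fun j => j) false)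
    matrix.length ((PySem.List.pyGetD matrix 0 []).length) hr
    ((PySem.List.pyGetD matrix 0 []).length + 1) 0 (by omega) (by omega)
  rw [show (0 : Nat) * matrix.length = 0 from by ring,
      show (if (0 : Nat) % 2 = 0 then true else false) = true from by simp] at hspec
  rw [hspec]

theorem pvChunk_getD (a : List Int) (m r j : Nat) (hj : j < r) :
    ((a.drop m).take r).getD j 0 = a.getD (m + j) 0 := by
  simp [List.getD, hj, List.getElem?_drop]

theorem pvChunkRev_getD (a : List Int) (m r j : Nat) (hj : j < r) (hlen : m + r ≤ a.length) :
    (((a.drop m).take r).reverse).getD j 0 = a.getD (m + (r - 1 - j)) 0 := by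
  have hl : ((a.drop m).take r).length = r := by
    simp [List.length_take, List.length_drop]; omega
  simp only [List.getD]
  rw [List.getElem?_reverse (by rw [hl]; exact hj), hl]
  have := pvChunk_getD a m r (r - 1 - j) (by omega)
  simpa [List.getD] using this

theorem up_down_col_sort_alt_eq_build (matrix : List (List Int))
    (hlen : matrix.length * ((PySem.List.pyGetD matrix 0 []).length)
      ≤ (PySem.List.sorted (matrix.flatMap (fun x => x)) (fun j => j) false).length) :
    up_down_col_sort_alt matrix
    = pvBuild (PySem.List.sorted (matrix.flatMap (fun x => x)) (fun j => j) false)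
        matrix.length ((PySem.List.pyGetD matrix 0 []).length)
        ((PySem.List.pyGetD matrix 0 []).length) := by
  simp only [up_down_col_sort_alt]
  rw [PySem.List.foldl_append_singleton_eq_map
      (fun i => if i % 2 = 0
        then PySem.List.slice (PySem.List.sorted (matrix.flatMap (fun x => x)) (fun j => j) false)
          (some ((i * matrix.length : Nat) : Int)) (some (((i + 1) * matrix.length : Nat) : Int))
        else (PySem.List.slice (PySem.List.sorted (matrix.flatMap (fun x => x)) (fun j => j) false)
          (some ((i * matrix.length : Nat) : Int)) (some (((i + 1) * matrix.length : Nat) : Int))).reverse)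
      (List.range ((PySem.List.pyGetD matrix 0 []).length)) []]
  rw [List.nil_append]
  unfold pvBuild
  apply List.map_congr_left
  intro j hj
  have hjr : j < matrix.length := List.mem_range.1 hj
  apply List.map_congr_left
  intro i hi
  have hic : i < (PySem.List.pyGetD matrix 0 []).length := List.mem_range.1 hi
  rw [if_pos hic]
  rw [List.getD_eq_getElem _ [] (by simpa using hic), List.getElem_map, List.getElem_range]
  rw [PySem.List.slice_natCast,
      show (i + 1) * matrix.length - i * matrix.length = matrix.length from by ring_nf; omega]
  have hbound : i * matrix.length + matrix.length
      ≤ (PySem.List.sorted (matrix.flatMap (fun x => x)) (fun j => j) false).length := by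
    have h1 : (i + 1) * matrix.length ≤ ((PySem.List.pyGetD matrix 0 []).length) * matrix.length :=
      Nat.mul_le_mul_right _ hic
    have h2 : i * matrix.length + matrix.length = (i + 1) * matrix.length := by ring
    have h3 : ((PySem.List.pyGetD matrix 0 []).length) * matrix.length
        = matrix.length * ((PySem.List.pyGetD matrix 0 []).length) := Nat.mul_comm _ _
    omega
  rcases Nat.decEq (i % 2) 0 with hpar | hpar
  · rw [if_neg hpar]
    unfold pvColVal
    rw [if_neg hpar]
    exact pvChunkRev_getD _ _ _ _ hjr hbound
  · rw [if_pos hpar]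
    unfold pvColVal
    rw [if_pos hpar]
    exact pvChunk_getD _ _ _ _ hjr

-- ===== VERDICT (by name: the statement is the Claim_ definition above) =====
theorem up_down_col_sort_spec : Claim_equal_up_down_col_sort := by
  intro matrix _ hPre
  unfold Spec_up_down_col_sort
  rw [up_down_col_sort_eq_build matrix hPre.1, up_down_col_sort_alt_eq_build matrix ?_]
  rw [PySem.List.length_sorted, List.length_flatMap]
  have h2 := hPre.2
  have hh : PySem.List.pyGetD matrix 0 [] = matrix.headD [] := by
    simp [PySem.List.pyGetD_zero]; cases matrix <;> simp
  rw [hh]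
  exact h2
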